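-- pv_equiv track=rewrite | github.com/joshanashakya/dissertation | workspace/dataset/java-python/GeeksForGeeks/861/A/2.py | isProduct
-- ===== SOURCE A (Python) =====
-- def isProduct( num):
--     cnt = 0
--
--     i = 2
--     while cnt < 2 and i * i <= num:
--         while (num % i == 0) :
--             num //= i
--             cnt += 1
--         i += 1
--
--     if (num > 1):
--         cnt += 1
--
--     return cnt == 2
-- ===== SOURCE B (Python) =====
-- def isProduct(num):
--     if num < 4:
--         return False
--     i = 2
--     while i * i <= num:
--         if num % i == 0:
--             return _is_prime(num // i)
--         i += 1
--     return False
--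
--
-- def _is_prime(m):
--     j = 2
--     while j * j <= m:
--         if m % j == 0:
--             return False
--         j += 1
--     return m >= 2
-- ===== Notes on version B (the rewrite author's own statement) =====
-- stated objective: alternative
-- what changed: Instead of counting total prime-factor multiplicity with nested division loops and an early-exit counter, B finds the smallest factor p once, then runs a separate trial-division primality test on the cofactor num//p.
import Mathlib
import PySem

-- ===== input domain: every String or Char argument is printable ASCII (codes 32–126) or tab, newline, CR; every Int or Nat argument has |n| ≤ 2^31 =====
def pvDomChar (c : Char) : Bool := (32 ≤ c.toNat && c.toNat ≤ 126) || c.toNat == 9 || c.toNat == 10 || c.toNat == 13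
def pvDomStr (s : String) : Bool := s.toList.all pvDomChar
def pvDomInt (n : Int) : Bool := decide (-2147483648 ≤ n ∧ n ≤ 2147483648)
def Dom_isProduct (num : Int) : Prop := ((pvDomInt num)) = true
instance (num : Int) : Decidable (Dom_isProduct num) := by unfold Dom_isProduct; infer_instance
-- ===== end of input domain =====

-- B re-implements the check as "extract the smallest factor, then primality-test the cofactor";
-- an alternative decomposition of the same trial-division idea (not claimed faster).

-- ===== PORT A =====
-- small termination helpers cited by the ports' decreasing_by (kept tactic-light on purpose)
theorem pv_ediv_lt (a b : Int) (ha : 0 < a) (hb : 2 ≤ b) : a / b < a := by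
  rw [Int.ediv_lt_iff_lt_mul (lt_of_lt_of_le zero_lt_two hb)]
  exact lt_mul_right ha (lt_of_lt_of_le one_lt_two hb)

theorem pv_le_of_sq_le (i num : Int) (hsq : i * i ≤ num) : i ≤ num := by
  by_cases h : i ≤ 0
  · exact le_trans h (le_trans (mul_self_nonneg i) hsq)
  · exact le_trans (le_mul_of_one_le_right (le_of_not_ge h) (lt_of_not_ge h)) hsq

-- inner 'while num % i == 0' loop of A; the extra '0 < num ∧ 2 ≤ i' conjuncts are pure
-- totality guards (every call from the outer loop satisfies them, so behaviour is unchanged).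
def innerA (num i cnt : Int) : Int × Int :=
  if h : PySem.Int.mod num i = 0 ∧ 0 < num ∧ 2 ≤ i then
    innerA (PySem.Int.floordiv num i) i (cnt + 1)
  else (num, cnt)
termination_by num.toNat
decreasing_by
  rw [PySem.Int.floordiv_eq_ediv_of_pos (lt_of_lt_of_le zero_lt_two h.2.2)]
  have h2 : num / i < num := pv_ediv_lt num i h.2.1 h.2.2
  exact Int.toNat_lt_toNat h.2.1 |>.mpr h2

theorem innerA_fst_le : ∀ (N : ℕ) (num i cnt : Int), num.toNat ≤ N → (innerA num i cnt).1 ≤ num := by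
  intro N
  induction N with
  | zero =>
    intro num i cnt hle
    rw [innerA.eq_def]
    split_ifs with hg
    · exact absurd hle (by omega)
    · exact le_refl num
  | succ N ih =>
    intro num i cnt hle
    rw [innerA.eq_def]
    split_ifs with hg
    · have hfd : PySem.Int.floordiv num i = num / i :=
        PySem.Int.floordiv_eq_ediv_of_pos (lt_of_lt_of_le zero_lt_two hg.2.2)
      have h2 : num / i < num := pv_ediv_lt num i hg.2.1 hg.2.2
      have h3 : 0 ≤ num / i := Int.ediv_nonneg (le_of_lt hg.2.1) (le_trans zero_le_two hg.2.2)
      have hrec := ih (PySem.Int.floordiv num i) i (cnt + 1) (by rw [hfd]; omega)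
      rw [hfd] at hrec ⊢
      omega
    · exact le_refl num

-- outer 'while cnt < 2 and i * i <= num' loop of A
def outerA (num i cnt : Int) : Int × Int :=
  if h : cnt < 2 ∧ i * i ≤ num then
    let p := innerA num i cnt
    outerA p.1 (i + 1) p.2
  else (num, cnt)
termination_by (num + 1 - i).toNat
decreasing_by
  have hle : (innerA num i cnt).1 ≤ num := innerA_fst_le num.toNat num i cnt (le_refl _)
  have hi : i ≤ num := pv_le_of_sq_le i num h.2
  omega

def isProduct (num : Int) : Bool :=
  let p := outerA num 2 0
  let cnt := if p.1 > 1 then p.2 + 1 else p.2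
  decide (cnt = 2)

-- ===== PORT B =====
-- 'while j * j <= m' loop of _is_prime
def primeLoop (m j : Int) : Bool :=
  if h : j * j ≤ m then
    if PySem.Int.mod m j = 0 then false else primeLoop m (j + 1)
  else decide (2 ≤ m)
termination_by (m + 1 - j).toNat
decreasing_by
  have hj : j ≤ m := pv_le_of_sq_le j m h
  omega

-- 'while i * i <= num' factor-search loop of isProduct (B)
def factorLoop (num i : Int) : Option Int :=
  if h : i * i ≤ num then
    if PySem.Int.mod num i = 0 then some i else factorLoop num (i + 1)
  else none
termination_by (num + 1 - i).toNat
decreasing_by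
  have hi : i ≤ num := pv_le_of_sq_le i num h
  omega

def isProduct_alt (num : Int) : Bool :=
  if num < 4 then false
  else
    match factorLoop num 2 with
    | some p => primeLoop (PySem.Int.floordiv num p) 2
    | none => false

-- ===== PRECONDITION & SPEC =====
def Spec_isProduct (num : Int) (out : Bool) : Prop := out = isProduct_alt num
instance (num : Int) (out : Bool) : Decidable (Spec_isProduct num out) := by unfold Spec_isProduct; infer_instance

-- ===== CLAIM (what is proved, stated in full; the proofs are below) =====
def Claim_equal_isProduct : Prop := ∀ (num : Int), Dom_isProduct num → Spec_isProduct num (isProduct num)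

-- ===== LEMMAS AND PROOFS =====

-- Ω(n): number of prime factors of n with multiplicity (proof-side ground truth)
def pvOmega (n : ℕ) : ℕ := (Nat.primeFactorsList n).length

theorem pvOmega_eq_zero {n : ℕ} (hn : 0 < n) : pvOmega n = 0 ↔ n = 1 := by
  simp only [pvOmega, List.length_eq_zero_iff, Nat.primeFactorsList_eq_nil]
  omega

theorem pvOmega_mul_prime {p m : ℕ} (hp : p.Prime) (hm : 0 < m) :
    pvOmega (p * m) = pvOmega m + 1 := by
  have hperm := Nat.perm_primeFactorsList_mul (a := p) (b := m) hp.ne_zero (by omega)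
  have hl := hperm.length_eq
  simp only [pvOmega] at *
  rw [hl, List.length_append, Nat.primeFactorsList_prime hp]
  simp [Nat.add_comm]

theorem pvOmega_eq_one {m : ℕ} (hm : 0 < m) : pvOmega m = 1 ↔ m.Prime := by
  constructor
  · intro h
    obtain ⟨q, hq⟩ := List.length_eq_one_iff.mp h
    have hmem : q ∈ m.primeFactorsList := by simp [hq]
    have hqp : q.Prime := Nat.prime_of_mem_primeFactorsList hmem
    have hprod : (Nat.primeFactorsList m).prod = m := Nat.prod_primeFactorsList (by omega)
    rw [hq] at hprod
    simp at hprod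
    rwa [← hprod]
  · intro h
    simp [pvOmega, Nat.primeFactorsList_prime h]

theorem not_prime_of_divisor {n j : ℕ} (h2 : 2 ≤ j) (hlt : j < n) (hd : j ∣ n) :
    ¬ n.Prime := by
  intro hp
  rcases (Nat.Prime.eq_one_or_self_of_dvd hp j hd) with h | h <;> omega

theorem smallest_divisor_prime {d n : ℕ} (hd2 : 2 ≤ d) (hdn : d ∣ n)
    (hmin : ∀ j, 2 ≤ j → j < d → ¬ j ∣ n) : d.Prime := by
  have hq := Nat.minFac_prime (n := d) (by omega)
  have h1 : d.minFac ∣ n := (Nat.minFac_dvd d).trans hdn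
  have h2 : d.minFac ≤ d := Nat.minFac_le (by omega)
  rcases lt_or_eq_of_le h2 with h | h
  · exact absurd h1 (hmin _ hq.two_le h)
  · rwa [h] at hq

theorem prime_of_sqrt_test {n : ℕ} (hn : 2 ≤ n) (h : ∀ j, 2 ≤ j → j * j ≤ n → ¬ j ∣ n) :
    n.Prime := by
  rw [Nat.prime_def_le_sqrt]
  refine ⟨hn, fun m hm hms => h m hm (Nat.le_sqrt.mp hms)⟩

-- "no prime factor below i and i² exceeds n" forces n = 1 or n prime
theorem small_or_prime {n i : Int} (hn : 0 < n) (hi : 2 ≤ i) (hgt : n < i * i)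
    (hmin : ∀ p : ℕ, p.Prime → (p : Int) ∣ n → i ≤ (p : Int)) :
    n = 1 ∨ Nat.Prime n.toNat := by
  by_cases h1 : n = 1
  · exact Or.inl h1
  right
  have hn2 : 2 ≤ n.toNat := by omega
  have hq := Nat.minFac_prime (n := n.toNat) (by omega)
  have hqd : (n.toNat.minFac : Int) ∣ n := by
    have : (n.toNat.minFac : Int) ∣ (n.toNat : Int) := Int.natCast_dvd_natCast.mpr (Nat.minFac_dvd _)
    rwa [Int.toNat_of_nonneg (by omega)] at this
  have hqi : i ≤ (n.toNat.minFac : Int) := hmin _ hq hqd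
  by_contra hnp
  have hsq := Nat.minFac_sq_le_self (n := n.toNat) (by omega) hnp
  have hsq' : ((n.toNat.minFac * n.toNat.minFac : ℕ) : Int) ≤ n := by
    rw [← pow_two] at *
    calc ((n.toNat.minFac ^ 2 : ℕ) : Int) ≤ ((n.toNat : ℕ) : Int) := by exact_mod_cast hsq
    _ = n := Int.toNat_of_nonneg (by omega)
  push_cast at hsq'
  nlinarith

theorem pvOmega_pos {n : ℕ} (hn : 2 ≤ n) : 1 ≤ pvOmega n := by
  by_contra h
  have : pvOmega n = 0 := by omega
  rw [pvOmega_eq_zero (by omega)] at this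
  omega

-- dvd / toNat bridges
theorem pv_dvd_toNat {i n : Int} (hn : 0 < n) (hi : 0 < i) :
    i ∣ n ↔ i.toNat ∣ n.toNat := by
  rw [← Int.natCast_dvd_natCast, Int.toNat_of_nonneg (by omega), Int.toNat_of_nonneg (by omega)]

-- the inner loop strips all factors i, decrementing Ω accordingly
theorem innerA_spec (i : Int) (hi : 2 ≤ i) :
    ∀ (N : ℕ) (n c : Int), n.toNat ≤ N → 0 < n →
    (∀ p : ℕ, p.Prime → (p : Int) ∣ n → i ≤ (p : Int)) →
    ∃ (n' : Int) (k : ℕ), innerA n i c = (n', c + k) ∧ 0 < n' ∧ ¬ (i ∣ n') ∧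
      (∀ p : ℕ, p.Prime → (p : Int) ∣ n' → i ≤ (p : Int)) ∧
      pvOmega n'.toNat + k = pvOmega n.toNat := by
  intro N
  induction N with
  | zero => intro n c hle hn _; omega
  | succ N ih =>
    intro n c hle hn hmin
    by_cases hdvd : PySem.Int.mod n i = 0
    · have hdvd' : i ∣ n := (PySem.Int.mod_eq_zero_iff_dvd n i).mp hdvd
      have hfd : PySem.Int.floordiv n i = n / i := PySem.Int.floordiv_eq_ediv_of_pos (by omega)
      set n1 := n / i with hn1
      have hmul : i * n1 = n := Int.mul_ediv_cancel' hdvd'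
      have hpos1 : 0 < n1 := by nlinarith
      have hlt : n1 < n := pv_ediv_lt n i hn hi
      -- i is prime, because n has no factor smaller than i
      have hip : Nat.Prime i.toNat := by
        apply smallest_divisor_prime (n := n.toNat) (by omega)
        · exact (pv_dvd_toNat hn (by omega)).mp hdvd'
        · intro j h2j hji hjd
          have hjd' : (j : Int) ∣ n := by
            have := Int.natCast_dvd_natCast.mpr hjd
            rwa [Int.toNat_of_nonneg (by omega)] at this
          have hjq := Nat.minFac_prime (n := j) (by omega)
          have : (j.minFac : Int) ∣ n := by
            have : (j.minFac : Int) ∣ (j : Int) := Int.natCast_dvd_natCast.mpr (Nat.minFac_dvd _)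
            exact this.trans hjd'
          have := hmin _ hjq this
          have := Nat.minFac_le (n := j) (by omega)
          omega
      have hmin1 : ∀ p : ℕ, p.Prime → (p : Int) ∣ n1 → i ≤ (p : Int) := by
        intro p hp hpd
        exact hmin p hp (hpd.trans ⟨i, by linarith [hmul.symm] ; ⟩)
      obtain ⟨n', k, heq, h1, h2, h3, h4⟩ := ih n1 (c + 1) (by omega) hpos1 hmin1
      refine ⟨n', k + 1, ?_, h1, h2, h3, ?_⟩
      · rw [innerA.eq_def, dif_pos ⟨hdvd, hn, hi⟩, hfd, heq]
        congr 1
        push_cast; ring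
      · have homega : pvOmega n.toNat = pvOmega n1.toNat + 1 := by
          have hnat : n.toNat = i.toNat * n1.toNat := by
            have : ((i.toNat * n1.toNat : ℕ) : Int) = n := by
              push_cast
              rw [Int.toNat_of_nonneg (by omega), Int.toNat_of_nonneg (by omega)]
              exact hmul
            omega
          rw [hnat, pvOmega_mul_prime hip (by omega)]
        omega
    · refine ⟨n, 0, ?_, hn, ?_, hmin, by simp⟩
      · rw [innerA.eq_def, dif_neg (by simp [hdvd])]
        simp
      · intro hc
        exact hdvd ((PySem.Int.mod_eq_zero_iff_dvd n i).mpr hc)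

-- the outer loop: Ω-accounting plus the exit analysis
theorem outerA_spec :
    ∀ (N : ℕ) (n i c : Int), (n + 1 - i).toNat ≤ N → 0 < n → 2 ≤ i → 0 ≤ c →
    (∀ p : ℕ, p.Prime → (p : Int) ∣ n → i ≤ (p : Int)) →
    ∃ (n₁ : Int) (k : ℕ), outerA n i c = (n₁, c + k) ∧ 0 < n₁ ∧
      pvOmega n₁.toNat + k = pvOmega n.toNat ∧
      (2 ≤ c + k ∨ n₁ = 1 ∨ Nat.Prime n₁.toNat) := by
  intro N
  induction N with
  | zero =>
    intro n i c hle hn hi hc hmin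
    by_cases hcond : c < 2 ∧ i * i ≤ n
    · exfalso
      have : i ≤ n := by nlinarith [hcond.2, sq_nonneg (i - 1)]
      omega
    · refine ⟨n, 0, ?_, hn, by simp, ?_⟩
      · rw [outerA.eq_def, dif_neg hcond]; simp
      · rcases not_and_or.mp hcond with h | h
        · left; omega
        · right
          exact small_or_prime hn hi (by omega) hmin
  | succ N ih =>
    intro n i c hle hn hi hc hmin
    by_cases hcond : c < 2 ∧ i * i ≤ n
    · obtain ⟨n', k, heq, hpos, hnd, hmin', hom⟩ :=
        innerA_spec i hi n.toNat n c (le_refl _) hn hmin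
      have hle' : n' ≤ n := by
        have := innerA_fst_le n.toNat n i c (le_refl _)
        rw [heq] at this; exact this
      have hmin'' : ∀ p : ℕ, p.Prime → (p : Int) ∣ n' → i + 1 ≤ (p : Int) := by
        intro p hp hpd
        have h1 := hmin' p hp hpd
        rcases lt_or_eq_of_le h1 with h | h
        · omega
        · exfalso
          apply hnd
          rw [h]
          exact hpd
      have hin : i ≤ n := by nlinarith [hcond.2, sq_nonneg (i - 1)]
      obtain ⟨n₁, k₁, heq₁, hp₁, hom₁, hd₁⟩ :=
        ih n' (i + 1) (c + k) (by omega) hpos (by omega) (by omega) hmin''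
      refine ⟨n₁, k + k₁, ?_, hp₁, by omega, ?_⟩
      · rw [outerA.eq_def, dif_pos hcond]
        simp only [heq, heq₁]
        congr 1
        push_cast; ring
      · rcases hd₁ with h | h
        · left; push_cast at h ⊢; omega
        · right; exact h
    · refine ⟨n, 0, ?_, hn, by simp, ?_⟩
      · rw [outerA.eq_def, dif_neg hcond]; simp
      · rcases not_and_or.mp hcond with h | h
        · left; omega
        · right
          exact small_or_prime hn hi (by omega) hmin

-- A computes "Ω(num) = 2" for every positive num
theorem isProduct_char (num : Int) (hnum : 0 < num) :
    isProduct num = decide (pvOmega num.toNat = 2) := by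
  obtain ⟨n₁, k, heq, hpos, hom, hd⟩ :=
    outerA_spec (num + 1 - 2).toNat num 2 0 (le_refl _) hnum (by omega) (by omega)
      (fun p hp _ => by exact_mod_cast hp.two_le)
  unfold isProduct
  rw [heq]
  simp only [zero_add]
  by_cases hgt : n₁ > 1
  · simp only [hgt, if_pos]
    have h1 : 1 ≤ pvOmega n₁.toNat := pvOmega_pos (by omega)
    rcases hd with h | h | h
    · -- early exit with k ≥ 2: both sides are false
      have hk : 2 ≤ k := by omega
      have : ¬ ((k : Int) + 1 = 2) := by omega
      simp only [this]
      have : ¬ (pvOmega num.toNat = 2) := by omega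
      simp [this]
    · omega
    · have : pvOmega n₁.toNat = 1 := (pvOmega_eq_one (by omega)).mpr h
      have hO : pvOmega num.toNat = k + 1 := by omega
      rw [hO]
      by_cases hk : k + 1 = 2
      · simp [hk]; omega
      · have : ¬ ((k : Int) + 1 = 2) := by omega
        simp [this, hk]
  · have hone : n₁ = 1 := by omega
    simp only [hgt]
    have : pvOmega n₁.toNat = 0 := by rw [hone]; simp [pvOmega]
    have hO : pvOmega num.toNat = k := by omega
    rw [hO]
    by_cases hk : k = 2
    · simp [hk]
    · have : ¬ ((k : Int) = 2) := by omega
      simp [this, hk]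

-- B-side loop characterisations
theorem primeLoop_spec :
    ∀ (N : ℕ) (m j : Int), (m + 1 - j).toNat ≤ N → 2 ≤ j → 2 ≤ m →
    (∀ t : Int, 2 ≤ t → t < j → ¬ t ∣ m) →
    primeLoop m j = decide (Nat.Prime m.toNat) := by
  intro N
  induction N with
  | zero =>
    intro m j hle hj hm hmin
    by_cases hcond : j * j ≤ m
    · exfalso
      have : j ≤ m := by nlinarith [hcond, sq_nonneg (j - 1)]
      omega
    · rw [primeLoop.eq_def, dif_neg hcond]
      have hp : Nat.Prime m.toNat := by
        apply prime_of_sqrt_test (by omega)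
        intro t h2t hts htd
        have htd' : (t : Int) ∣ m := by
          have := Int.natCast_dvd_natCast.mpr htd
          rwa [Int.toNat_of_nonneg (by omega)] at this
        have htsInt : (t : Int) * t ≤ m := by
          have h0 : ((t * t : ℕ) : Int) ≤ ((m.toNat : ℕ) : Int) := by exact_mod_cast hts
          rw [Int.toNat_of_nonneg (by omega)] at h0
          push_cast at h0
          exact h0
        have htj : (t : Int) < j := by
          by_contra hcc
          have hcc' : j ≤ (t : Int) := le_of_not_gt hcc
          have hjj : j * j ≤ (t : Int) * t := mul_le_mul hcc' hcc' (by omega) (by positivity)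
          have := lt_of_not_ge hcond
          linarith
        exact hmin t (by omega) htj htd'
      simp [hp, hm]
  | succ N ih =>
    intro m j hle hj hm hmin
    by_cases hcond : j * j ≤ m
    · rw [primeLoop.eq_def, dif_pos hcond]
      by_cases hdvd : PySem.Int.mod m j = 0
      · have hdvd' : j ∣ m := (PySem.Int.mod_eq_zero_iff_dvd m j).mp hdvd
        have hjm : j < m := by nlinarith [hcond]
        have : ¬ Nat.Prime m.toNat := by
          apply not_prime_of_divisor (n := m.toNat) (j := j.toNat) (by omega) (by omega)
          exact (pv_dvd_toNat (by omega) (by omega)).mp hdvd'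
        simp [hdvd, this]
      · rw [if_neg hdvd]
        have hjmle : j ≤ m := by nlinarith [hcond, sq_nonneg (j - 1)]
        apply ih m (j + 1) (by omega) (by omega) hm
        intro t h2t htj htd
        rcases lt_or_eq_of_le (by omega : t ≤ j) with h | h
        · exact hmin t h2t h htd
        · subst h
          exact hdvd ((PySem.Int.mod_eq_zero_iff_dvd m t).mpr htd)
    · rw [primeLoop.eq_def, dif_neg hcond]
      have hp : Nat.Prime m.toNat := by
        apply prime_of_sqrt_test (by omega)
        intro t h2t hts htd
        have htd' : (t : Int) ∣ m := by
          have := Int.natCast_dvd_natCast.mpr htd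
          rwa [Int.toNat_of_nonneg (by omega)] at this
        have htsInt : (t : Int) * t ≤ m := by
          have h0 : ((t * t : ℕ) : Int) ≤ ((m.toNat : ℕ) : Int) := by exact_mod_cast hts
          rw [Int.toNat_of_nonneg (by omega)] at h0
          push_cast at h0
          exact h0
        have htj : (t : Int) < j := by
          by_contra hcc
          have hcc' : j ≤ (t : Int) := le_of_not_gt hcc
          have hjj : j * j ≤ (t : Int) * t := mul_le_mul hcc' hcc' (by omega) (by positivity)
          have := lt_of_not_ge hcond
          linarith
        exact hmin t (by omega) htj htd'
      simp [hp, hm]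

theorem factorLoop_spec :
    ∀ (N : ℕ) (num i : Int), (num + 1 - i).toNat ≤ N → 2 ≤ i → 2 ≤ num →
    (∀ t : Int, 2 ≤ t → t < i → ¬ t ∣ num) →
    (∀ p, factorLoop num i = some p →
      2 ≤ p ∧ p ∣ num ∧ p * p ≤ num ∧ ∀ t : Int, 2 ≤ t → t < p → ¬ t ∣ num) ∧
    (factorLoop num i = none → ∀ t : Int, 2 ≤ t → t * t ≤ num → ¬ t ∣ num) := by
  intro N
  induction N with
  | zero =>
    intro num i hle hi hnum hmin
    by_cases hcond : i * i ≤ num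
    · exfalso
      have : i ≤ num := by nlinarith [hcond, sq_nonneg (i - 1)]
      omega
    · rw [factorLoop.eq_def, dif_neg hcond]
      refine ⟨fun p hp => by simp at hp, fun _ t h2t hts htd => ?_⟩
      have : t < i := by nlinarith [lt_of_not_ge hcond]
      exact hmin t h2t this htd
  | succ N ih =>
    intro num i hle hi hnum hmin
    by_cases hcond : i * i ≤ num
    · rw [factorLoop.eq_def, dif_pos hcond]
      by_cases hdvd : PySem.Int.mod num i = 0
      · rw [if_pos hdvd]
        refine ⟨fun p hp => ?_, fun hnone => by simp at hnone⟩
        have hpi : p = i := by injection hp with h; omega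
        subst hpi
        exact ⟨hi, (PySem.Int.mod_eq_zero_iff_dvd _ _).mp hdvd, hcond, hmin⟩
      · rw [if_neg hdvd]
        have hile : i ≤ num := by nlinarith [hcond, sq_nonneg (i - 1)]
        apply ih num (i + 1) (by omega) (by omega) hnum
        intro t h2t hti htd
        rcases lt_or_eq_of_le (by omega : t ≤ i) with h | h
        · exact hmin t h2t h htd
        · subst h
          exact hdvd ((PySem.Int.mod_eq_zero_iff_dvd num t).mpr htd)
    · rw [factorLoop.eq_def, dif_neg hcond]
      refine ⟨fun p hp => by simp at hp, fun _ t h2t hts htd => ?_⟩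
      have : t < i := by nlinarith [lt_of_not_ge hcond]
      exact hmin t h2t this htd

-- B computes "Ω(num) = 2" for every num ≥ 4 (below 4 it is False, as is "Ω = 2")
theorem isProduct_alt_char (num : Int) (hnum : 0 < num) :
    isProduct_alt num = decide (pvOmega num.toNat = 2) := by
  unfold isProduct_alt
  by_cases h4 : num < 4
  · rw [if_pos h4]
    interval_cases num <;> simp [pvOmega]
  · rw [if_neg h4]
    have hnum2 : 2 ≤ num := by omega
    obtain ⟨hsome, hnone⟩ :=
      factorLoop_spec (num + 1 - 2).toNat num 2 (le_refl _) (by omega) hnum2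
        (fun t h2t hti => by omega)
    cases hfl : factorLoop num 2 with
    | none =>
      have hp : Nat.Prime num.toNat := by
        apply prime_of_sqrt_test (by omega)
        intro t h2t hts htd
        have htd' : (t : Int) ∣ num := by
          have := Int.natCast_dvd_natCast.mpr htd
          rwa [Int.toNat_of_nonneg (by omega)] at this
        refine hnone hfl t (by omega) ?_ htd'
        calc ((t * t : ℕ) : Int) ≤ ((num.toNat : ℕ) : Int) := by exact_mod_cast hts
        _ = num := Int.toNat_of_nonneg (by omega)
      have hO : pvOmega num.toNat = 1 := (pvOmega_eq_one (by omega)).mpr hp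
      simp [hO]
    | some p =>
      obtain ⟨hp2, hpd, hpsq, hpmin⟩ := hsome p hfl
      have hfd : PySem.Int.floordiv num p = num / p := PySem.Int.floordiv_eq_ediv_of_pos (by omega)
      show primeLoop (PySem.Int.floordiv num p) 2 = _
      rw [hfd]
      set m := num / p with hm
      have hmul : p * m = num := Int.mul_ediv_cancel' hpd
      have hmpos : 0 < m := by nlinarith
      have hmge : p ≤ m := by
        rw [hm, Int.le_ediv_iff_mul_le (by omega)]
        exact hpsq
      -- p is prime (it is the smallest divisor ≥ 2)
      have hpp : Nat.Prime p.toNat := by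
        apply smallest_divisor_prime (n := num.toNat) (by omega)
        · exact (pv_dvd_toNat (by omega) (by omega)).mp hpd
        · intro j h2j hjp hjd
          have hjd' : (j : Int) ∣ num := by
            have := Int.natCast_dvd_natCast.mpr hjd
            rwa [Int.toNat_of_nonneg (by omega)] at this
          exact hpmin j (by omega) (by omega) hjd'
      have hploop := primeLoop_spec (m + 1 - 2).toNat m 2 (le_refl _) (by omega) (by omega)
        (fun t h2t hti => by omega)
      rw [hploop]
      have hO : pvOmega num.toNat = pvOmega m.toNat + 1 := by
        have hnat : num.toNat = p.toNat * m.toNat := by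
          have : ((p.toNat * m.toNat : ℕ) : Int) = num := by
            push_cast
            rw [Int.toNat_of_nonneg (by omega), Int.toNat_of_nonneg (by omega)]
            exact hmul
          omega
        rw [hnat, pvOmega_mul_prime hpp (by omega)]
      have hiff : (Nat.Prime m.toNat) ↔ (pvOmega num.toNat = 2) := by
        rw [hO]
        constructor
        · intro h; rw [(pvOmega_eq_one (by omega)).mpr h]
        · intro h
          exact (pvOmega_eq_one (by omega)).mp (by omega)
      by_cases hmp : Nat.Prime m.toNat
      · simp [hmp, hiff.mp hmp]
      · have : ¬ pvOmega num.toNat = 2 := fun h => hmp (hiff.mpr h)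
        simp [hmp, this]

-- ===== VERDICT (by name: the statement is the Claim_ definition above) =====
theorem isProduct_spec : Claim_equal_isProduct := by
  intro num _
  unfold Spec_isProduct
  by_cases hpos : 0 < num
  · rw [isProduct_char num hpos, isProduct_alt_char num hpos]
  · -- num ≤ 0: A's outer loop never runs (4 ≤ num fails), B returns False at num < 4
    have h4 : num < 4 := by omega
    unfold isProduct isProduct_alt
    rw [outerA.eq_def, dif_neg (by omega)]
    simp only [if_pos h4]
    have : ¬ (num > 1) := by omega
    simp [this]
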